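-- pv_equiv track=rewrite | github.com/Narek889/NPUA | Ալգորիթմների տեսություն/Semester I/Finite automata.py | finite_automaton_search
-- ===== SOURCE A (Python) =====
-- def build_transition_table(pattern):
--     m = len(pattern)
--     transition = [{} for _ in range(m + 1)]
--
--     for state in range(m + 1):
--         for char in set(pattern):
--             if state < m and char == pattern[state]:
--                 transition[state][char] = state + 1
--             else:
--                 for k in range(state, 0, -1):
--                     if pattern[:k] == (pattern[state - k + 1:state] + char):
--                         transition[state][char] = k
--                         break
--                 else:
--                     transition[state][char] = 0
--     return transition
--
-- def finite_automaton_search(text, pattern):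
--     transition = build_transition_table(pattern)
--     state = 0
--     matches = []
--
--     for i, char in enumerate(text):
--         state = transition[state].get(char, 0)
--         if state == len(pattern):
--             matches.append(i - len(pattern) + 1)
--
--     return matches
-- ===== SOURCE B (Python) =====
-- def finite_automaton_search(text, pattern):
--     m = len(pattern)
--     n = len(text)
--     return [i - m + 1 for i in range(n) if i + 1 >= m and text[i - m + 1:i + 1] == pattern]
-- ===== Notes on version B (the rewrite author's own statement) =====
-- stated objective: simpler
-- what changed: B drops A's O(m^3*sigma) DFA transition-table construction and automaton scan entirely and instead directly compares the length-m text window ending at each index with the pattern.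
import Mathlib
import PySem

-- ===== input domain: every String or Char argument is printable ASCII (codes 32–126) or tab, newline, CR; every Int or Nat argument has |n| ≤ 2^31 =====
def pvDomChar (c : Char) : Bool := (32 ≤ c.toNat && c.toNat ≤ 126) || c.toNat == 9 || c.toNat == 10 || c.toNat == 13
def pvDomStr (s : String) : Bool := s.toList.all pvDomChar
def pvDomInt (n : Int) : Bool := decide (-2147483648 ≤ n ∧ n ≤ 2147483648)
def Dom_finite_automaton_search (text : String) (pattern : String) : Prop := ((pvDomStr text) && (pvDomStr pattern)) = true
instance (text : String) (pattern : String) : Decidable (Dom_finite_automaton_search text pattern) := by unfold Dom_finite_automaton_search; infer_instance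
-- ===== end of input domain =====

-- B replaces A's DFA-table construction + scan by a direct window comparison at every end
-- position of the text (objective: simpler); same return value on all inputs.

-- ===== PORT A =====
-- the inner 'for k in range(state, 0, -1): … break / else: 0' loop of build_transition_table
def pvFindK (p : List Char) (c : Char) (state : Nat) : Nat → Int
  | 0 => 0
  | k' + 1 =>
    if p.take (k' + 1) =
        (PySem.List.slice p (some ((state : Int) - ((k' : Int) + 1) + 1)) (some (state : Int))) ++ [c]
    then ((k' : Int) + 1)
    else pvFindK p c state k'

-- the value stored at transition[state][char]
def pvTransVal (p : List Char) (state : Nat) (c : Char) : Int :=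
  if state < p.length ∧ p[state]? = some c then (state : Int) + 1
  else pvFindK p c state state

-- the dict transition[state] ('for char in set(pattern)'; the resulting dict does not depend
-- on the set's iteration order: keys are distinct and each value is a function of its key only)
def pvRow (p : List Char) (state : Nat) : PySem.Dict Char Int :=
  (PySem.Set.ofList p).foldl (fun d ch => d.insert ch (pvTransVal p state ch)) PySem.Dict.empty

def pvTable (p : List Char) : List (PySem.Dict Char Int) :=
  (List.range (p.length + 1)).map (fun state => pvRow p state)

-- the body of A's scan loop; the 'none' branch is unreachable (the state is always one of
-- 0..m, a valid index; Python would raise IndexError there)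
def pvStep (transition : List (PySem.Dict Char Int)) (m : Nat)
    (st : Int × List Int) (ic : Int × Char) : Int × List Int :=
  let s' : Int :=
    match PySem.List.pyGet? transition st.1 with
    | some d => PySem.Dict.getD d ic.2 0
    | none => 0
  if s' = (m : Int) then (s', st.2 ++ [ic.1 - (m : Int) + 1]) else (s', st.2)

def finite_automaton_search (text : String) (pattern : String) : List Int :=
  let p := pattern.toList
  let m := p.length
  let transition := pvTable p
  ((PySem.List.enumerate text.toList 0).foldl (pvStep transition m) ((0 : Int), ([] : List Int))).2

-- ===== PORT B =====
def finite_automaton_search_alt (text : String) (pattern : String) : List Int :=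
  let p := pattern.toList
  let t := text.toList
  let m := p.length
  ((List.range t.length).filter (fun i =>
      decide (m ≤ i + 1 ∧
        PySem.List.slice t (some ((i : Int) - (m : Int) + 1)) (some ((i : Int) + 1)) = p))).map
    (fun (i : Nat) => (i : Int) - (m : Int) + 1)

-- ===== PRECONDITION & SPEC =====
def Spec_finite_automaton_search (text : String) (pattern : String) (out : List Int) : Prop := out = finite_automaton_search_alt text pattern
instance (text : String) (pattern : String) (out : List Int) : Decidable (Spec_finite_automaton_search text pattern out) := by unfold Spec_finite_automaton_search; infer_instance

-- ===== CLAIM (what is proved, stated in full; the proofs are below) =====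
def Claim_equal_finite_automaton_search : Prop := ∀ (text : String) (pattern : String), Dom_finite_automaton_search text pattern → Spec_finite_automaton_search text pattern (finite_automaton_search text pattern)

-- ===== LEMMAS AND PROOFS =====

-- the classical DFA state: longest k ≤ |p| such that p.take k is a suffix of t
def pvBord (p t : List Char) : Nat := Nat.findGreatest (fun k => p.take k <:+ t) p.length

lemma pvBord_le (p t : List Char) : pvBord p t ≤ p.length := Nat.findGreatest_le _

lemma pvBord_suffix (p t : List Char) : p.take (pvBord p t) <:+ t := by
  rcases Nat.eq_zero_or_pos (pvBord p t) with h | h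
  · simp [h]
  · have h0 : p.take 0 <:+ t := by simp
    exact Nat.findGreatest_spec (P := fun k => p.take k <:+ t) (Nat.zero_le _) h0

lemma pvBord_is_greatest {p t : List Char} {k : Nat} (hk : k ≤ p.length)
    (h : p.take k <:+ t) : k ≤ pvBord p t := by
  by_contra hlt
  exact Nat.findGreatest_is_greatest (Nat.lt_of_not_le hlt) hk h

lemma pvBord_nil (p : List Char) : pvBord p [] = 0 := by
  rw [pvBord, Nat.findGreatest_eq_zero_iff]
  intro n hn hnl hsuf
  have heq : p.take n = [] := List.suffix_nil.mp hsuf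
  have hmin : min n p.length = 0 := by
    simpa using congrArg List.length heq
  omega

lemma pvSuffixAppend {a b : List Char} (s : List Char) (h : a <:+ b) : a ++ s <:+ b ++ s := by
  obtain ⟨u, rfl⟩ := h
  exact ⟨u, by simp⟩

lemma suffix_concat_concat {a b : List Char} {x y : Char}
    (h : a ++ [x] <:+ b ++ [y]) : a <:+ b ∧ x = y := by
  rcases h with ⟨s, hs⟩
  have hs' : (s ++ a) ++ [x] = b ++ [y] := by simpa [List.append_assoc] using hs
  have hlen : ((s ++ a) ++ [x]).length = (b ++ [y]).length := congrArg List.length hs'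
  have := List.append_inj hs' (by simp at hlen ⊢; omega)
  exact ⟨⟨s, this.1⟩, by simpa using this.2⟩

lemma suffix_of_suffix_le {a b t : List Char} (ha : a <:+ t) (hb : b <:+ t)
    (hle : a.length ≤ b.length) : a <:+ b := by
  have ha' := List.suffix_iff_eq_drop.mp ha
  have hbl : b.length ≤ t.length := hb.length_le
  rw [List.suffix_iff_eq_drop.mp hb, ha', List.suffix_iff_eq_drop]
  simp only [List.drop_drop, List.length_drop]
  congr 1
  omega

lemma findGreatest_congr (P Q : Nat → Prop) [DecidablePred P] [DecidablePred Q] (b : Nat)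
    (h : ∀ k, k ≤ b → (P k ↔ Q k)) : Nat.findGreatest P b = Nat.findGreatest Q b := by
  induction b with
  | zero => rfl
  | succ n ih =>
    rw [Nat.findGreatest_succ, Nat.findGreatest_succ, ih (fun k hk => h k (Nat.le_succ_of_le hk))]
    by_cases hp : P (n + 1)
    · rw [if_pos hp, if_pos ((h (n + 1) le_rfl).mp hp)]
    · rw [if_neg hp, if_neg (fun hq => hp ((h (n + 1) le_rfl).mpr hq))]

lemma findGreatest_eq_of_none_above (P : Nat → Prop) [DecidablePred P] {b j : Nat} (hj : j ≤ b)
    (hno : ∀ k, j < k → k ≤ b → ¬P k) : Nat.findGreatest P b = Nat.findGreatest P j := by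
  induction b with
  | zero =>
    have : j = 0 := Nat.le_zero.mp hj
    rw [this]
  | succ n ih =>
    rcases Nat.eq_or_lt_of_le hj with rfl | hlt
    · rfl
    · rw [Nat.findGreatest_succ, if_neg (hno (n + 1) hlt le_rfl),
        ih (by omega) (fun k h1 h2 => hno k h1 (by omega))]

lemma take_succ_getElem (p : List Char) (k : Nat) (hk : k < p.length) :
    p.take (k + 1) = p.take k ++ [p[k]] := by
  rw [List.take_add_one, List.getElem?_eq_getElem hk]
  rfl

-- extending the consumed text by one character steps the border like the DFA does
lemma pvBord_append (p t : List Char) (c : Char) :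
    pvBord p (t ++ [c]) = pvBord p (p.take (pvBord p t) ++ [c]) := by
  apply findGreatest_congr
  intro k hk
  constructor
  · intro hsuf
    cases k with
    | zero => simp
    | succ k' =>
      have hk' : k' < p.length := hk
      rw [take_succ_getElem p k' hk'] at hsuf ⊢
      obtain ⟨hsuf', hc⟩ := suffix_concat_concat hsuf
      have hk'q : k' ≤ pvBord p t := pvBord_is_greatest (Nat.le_of_lt hk') hsuf'
      have hss : p.take k' <:+ p.take (pvBord p t) :=
        suffix_of_suffix_le hsuf' (pvBord_suffix p t)
          (by simp only [List.length_take]; omega)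
      rw [hc]
      exact pvSuffixAppend [c] hss
  · intro hsuf
    exact hsuf.trans (pvSuffixAppend [c] (pvBord_suffix p t))

-- the descending k-loop computes the greatest matching k ≤ j
lemma pvFindK_eq (p : List Char) (c : Char) (state : Nat) (hs : state ≤ p.length) :
    ∀ j, j ≤ state →
      pvFindK p c state j =
        ((Nat.findGreatest (fun k => p.take k <:+ p.take state ++ [c]) j : Nat) : Int) := by
  intro j
  induction j with
  | zero => intro _; rfl
  | succ j' ih =>
    intro hj
    have hjs : j' + 1 ≤ state := hj
    have ha : (state : Int) - ((j' : Int) + 1) + 1 = ((state - j' : Nat) : Int) := by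
      omega
    have hslice : PySem.List.slice p (some ((state : Int) - ((j' : Int) + 1) + 1))
        (some (state : Int)) = (p.drop (state - j')).take j' := by
      rw [ha, show (state : Int) = ((state : Nat) : Int) from rfl, PySem.List.slice_natCast,
        show state - (state - j') = j' from by omega]
    have hdrop : (p.take state ++ [c]).drop (state - j') =
        (p.drop (state - j')).take j' ++ [c] := by
      rw [List.drop_append_of_le_length (by rw [List.length_take]; omega), List.drop_take,
        show state - (state - j') = j' from by omega]
    have hlen1 : (p.take (j' + 1)).length = j' + 1 := by rw [List.length_take]; omega
    have hlen2 : (p.take state ++ [c]).length = state + 1 := by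
      rw [List.length_append, List.length_take]
      simp
      omega
    have hcond : (p.take (j' + 1) = (p.drop (state - j')).take j' ++ [c]) ↔
        (p.take (j' + 1) <:+ p.take state ++ [c]) := by
      rw [List.suffix_iff_eq_drop, hlen1, hlen2,
        show state + 1 - (j' + 1) = state - j' from by omega, hdrop]
    simp only [pvFindK, hslice]
    rw [Nat.findGreatest_succ]
    by_cases h : p.take (j' + 1) <:+ p.take state ++ [c]
    · rw [if_pos (hcond.mpr h), if_pos h]
      push_cast; ring
    · rw [if_neg (fun hh => h (hcond.mp hh)), if_neg h, ih (by omega)]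

lemma pvTransVal_eq (p : List Char) (c : Char) (state : Nat) (hs : state ≤ p.length) :
    pvTransVal p state c = ((pvBord p (p.take state ++ [c]) : Nat) : Int) := by
  have hlen2 : (p.take state ++ [c]).length = state + 1 := by
    rw [List.length_append, List.length_take]
    simp
    omega
  by_cases h : state < p.length ∧ p[state]? = some c
  · rw [pvTransVal, if_pos h]
    have hc : p[state] = c := by
      have h2 := h.2
      rw [List.getElem?_eq_getElem h.1] at h2
      exact Option.some_injective _ h2
    have hbv : pvBord p (p.take state ++ [c]) = state + 1 := by
      rw [pvBord, Nat.findGreatest_eq_iff]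
      refine ⟨h.1, fun _ => ?_, fun n hn1 hn2 hsuf => ?_⟩
      · rw [take_succ_getElem p state h.1, hc]
      · have hle := hsuf.length_le
        rw [hlen2] at hle
        rw [List.length_take] at hle
        omega
    rw [hbv]
    push_cast; ring
  · rw [pvTransVal, if_neg h, pvFindK_eq p c state hs state le_rfl]
    congr 1
    refine (findGreatest_eq_of_none_above _ hs fun k hk1 hk2 hsuf => ?_).symm
    have hlk : (p.take k).length = k := by rw [List.length_take]; omega
    have hle := hsuf.length_le
    rw [hlen2, hlk] at hle
    have hk : k = state + 1 := by omega
    subst hk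
    have hst : state < p.length := by omega
    have heq : p.take (state + 1) = p.take state ++ [c] := by
      have hdr := List.suffix_iff_eq_drop.mp hsuf
      rw [hlk, hlen2] at hdr
      simpa using hdr
    rw [take_succ_getElem p state hst] at heq
    have hxy := (List.append_inj heq (by simp)).2
    exact h ⟨hst, by rw [List.getElem?_eq_getElem hst]; simpa using hxy⟩

lemma pvBord_not_mem (p : List Char) (c : Char) (hc : c ∉ p) (t : List Char) :
    pvBord p (t ++ [c]) = 0 := by
  rw [pvBord, Nat.findGreatest_eq_zero_iff]
  intro n hn hnl hsuf
  obtain ⟨n', rfl⟩ : ∃ n', n = n' + 1 := ⟨n - 1, by omega⟩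
  have hn' : n' < p.length := hnl
  rw [take_succ_getElem p n' hn'] at hsuf
  obtain ⟨-, hc'⟩ := suffix_concat_concat hsuf
  exact hc (hc' ▸ List.getElem_mem hn')

lemma foldl_insert_getD (L : List Char) (f : Char → Int) :
    ∀ (d : PySem.Dict Char Int) (c : Char),
      (L.foldl (fun d x => d.insert x (f x)) d).getD c 0 =
        if c ∈ L then f c else d.getD c 0 := by
  induction L with
  | nil => intro d c; simp
  | cons x L ih =>
    intro d c
    rw [List.foldl_cons, ih]
    by_cases hL : c ∈ L
    · simp [hL]
    · rw [if_neg hL, PySem.Dict.getD_insert]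
      by_cases hx : c = x
      · simp [hx]
      · simp [hx, hL]

lemma pvRow_getD (p : List Char) (state : Nat) (c : Char) :
    (pvRow p state).getD c 0 = if c ∈ p then pvTransVal p state c else 0 := by
  rw [pvRow, foldl_insert_getD]
  have hmem : c ∈ PySem.Set.ofList p ↔ c ∈ p := PySem.Set.mem_ofList p c
  by_cases hc : c ∈ p
  · rw [if_pos (hmem.mpr hc), if_pos hc]
  · rw [if_neg (fun h => hc (hmem.mp h)), if_neg hc]
    rfl

lemma pvTable_get (p : List Char) (q : Nat) (hq : q ≤ p.length) :
    PySem.List.pyGet? (pvTable p) ((q : Nat) : Int) = some (pvRow p q) := by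
  rw [PySem.List.pyGet?_natCast, pvTable]
  rw [List.getElem?_map]
  rw [List.getElem?_range (by omega)]
  rfl

lemma pvRowVal (p : List Char) (q : Nat) (c : Char) (hq : q ≤ p.length) :
    (pvRow p q).getD c 0 = ((pvBord p (p.take q ++ [c]) : Nat) : Int) := by
  rw [pvRow_getD]
  by_cases hc : c ∈ p
  · rw [if_pos hc, pvTransVal_eq p c q hq]
  · rw [if_neg hc, pvBord_not_mem p c hc]
    simp

-- the matches recorded while scanning s after having consumed u
def pvMatches (p u s : List Char) : List Int :=
  (List.range s.length).filterMap (fun j =>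
    if pvBord p (u ++ s.take (j + 1)) = p.length then
      some ((u.length : Int) + (j : Int) - (p.length : Int) + 1)
    else none)

lemma pvMatches_nil (p u : List Char) : pvMatches p u [] = [] := rfl

lemma pvMatches_cons (p u : List Char) (c : Char) (s : List Char) :
    pvMatches p u (c :: s) =
      (if pvBord p (u ++ [c]) = p.length then
        [(u.length : Int) - (p.length : Int) + 1] else []) ++ pvMatches p (u ++ [c]) s := by
  rw [pvMatches, pvMatches]
  simp only [List.length_cons, List.range_succ_eq_map, List.filterMap_cons, List.filterMap_map]
  have htail : ∀ j ∈ List.range s.length,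
      ((fun j => if pvBord p (u ++ (c :: s).take (j + 1)) = p.length then
          some ((u.length : Int) + (j : Int) - (p.length : Int) + 1) else none) ∘ Nat.succ) j =
      (fun j => if pvBord p ((u ++ [c]) ++ s.take (j + 1)) = p.length then
          some (((u ++ [c]).length : Int) + (j : Int) - (p.length : Int) + 1) else none) j := by
    intro j _
    simp only [Function.comp_apply, List.take_succ_cons, List.append_assoc, List.cons_append,
      List.nil_append, List.length_append, List.length_cons, List.length_nil]
    congr 2
    push_cast
    ring
  rw [List.filterMap_congr htail]
  by_cases hb : pvBord p (u ++ [c]) = p.length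
  · simp [hb]
  · simp [hb]

lemma pvScan (p : List Char) (s : List Char) :
    ∀ (u : List Char) (acc : List Int),
      (PySem.List.enumerate s ((u.length : Nat) : Int)).foldl
          (pvStep (pvTable p) p.length) (((pvBord p u : Nat) : Int), acc)
        = (((pvBord p (u ++ s) : Nat) : Int), acc ++ pvMatches p u s) := by
  induction s with
  | nil => intro u acc; simp [PySem.List.enumerate_nil, pvMatches_nil]
  | cons c s ih =>
    intro u acc
    rw [PySem.List.enumerate_cons, List.foldl_cons]
    have hlook : (match PySem.List.pyGet? (pvTable p) ((pvBord p u : Nat) : Int) with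
        | some d => PySem.Dict.getD d c 0
        | none => 0) = ((pvBord p (u ++ [c]) : Nat) : Int) := by
      rw [pvTable_get p (pvBord p u) (pvBord_le p u)]
      show (pvRow p (pvBord p u)).getD c 0 = _
      rw [pvRowVal p (pvBord p u) c (pvBord_le p u), ← pvBord_append]
    have hstep : pvStep (pvTable p) p.length (((pvBord p u : Nat) : Int), acc)
        (((u.length : Nat) : Int), c) =
        ((((pvBord p (u ++ [c]) : Nat) : Int)),
          if pvBord p (u ++ [c]) = p.length then
            acc ++ [(u.length : Int) - (p.length : Int) + 1] else acc) := by
      simp only [pvStep]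
      rw [hlook]
      by_cases hb : pvBord p (u ++ [c]) = p.length
      · rw [if_pos (by exact_mod_cast congrArg (Nat.cast : Nat → Int) hb), if_pos hb]
      · rw [if_neg (fun h => hb (by exact_mod_cast h)), if_neg hb]
    rw [hstep]
    have hlu : (((u ++ [c]).length : Nat) : Int) = ((u.length : Nat) : Int) + 1 := by
      rw [List.length_append]
      push_cast
      simp
    by_cases hb : pvBord p (u ++ [c]) = p.length
    · rw [if_pos hb]
      have hih := ih (u ++ [c]) (acc ++ [(u.length : Int) - (p.length : Int) + 1])
      rw [hlu] at hih
      rw [hih, pvMatches_cons, if_pos hb]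
      simp [List.append_assoc]
    · rw [if_neg hb]
      have hih := ih (u ++ [c]) acc
      rw [hlu] at hih
      rw [hih, pvMatches_cons, if_neg hb]
      simp [List.append_assoc]

lemma A_eq (text pattern : String) :
    finite_automaton_search text pattern = pvMatches pattern.toList [] text.toList := by
  rw [finite_automaton_search]
  have hs := pvScan pattern.toList text.toList [] []
  rw [pvBord_nil] at hs
  simp only [List.length_nil, Nat.cast_zero, List.nil_append] at hs
  rw [hs]

lemma filter_map_eq_filterMap (l : List Nat) (q : Nat → Prop) [DecidablePred q]
    (f : Nat → Int) :
    (l.filter (fun x => decide (q x))).map f =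
      l.filterMap (fun x => if q x then some (f x) else none) := by
  induction l with
  | nil => rfl
  | cons x l ih =>
    by_cases hx : q x
    · simp [hx, ih]
    · simp [hx, ih]

lemma cond_iff (p t : List Char) (i : Nat) (hi : i < t.length) :
    (p.length ≤ i + 1 ∧
      PySem.List.slice t (some ((i : Int) - (p.length : Int) + 1)) (some ((i : Int) + 1))
        = p)
    ↔ pvBord p (t.take (i + 1)) = p.length := by
  have hlen : (t.take (i + 1)).length = i + 1 := by rw [List.length_take]; omega
  constructor
  · rintro ⟨hm, hsl⟩
    have ha : (i : Int) - (p.length : Int) + 1 = ((i + 1 - p.length : Nat) : Int) := by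
      omega
    have hb' : (i : Int) + 1 = ((i + 1 : Nat) : Int) := by push_cast; ring
    rw [ha, hb', PySem.List.slice_natCast,
      show i + 1 - (i + 1 - p.length) = p.length from by omega] at hsl
    have hsuf : p <:+ t.take (i + 1) := by
      rw [List.suffix_iff_eq_drop, hlen, List.drop_take,
        show i + 1 - (i + 1 - p.length) = p.length from by omega]
      exact hsl.symm
    exact Nat.le_antisymm (pvBord_le _ _)
      (pvBord_is_greatest le_rfl (by rwa [List.take_length]))
  · intro hb
    have hsuf := pvBord_suffix p (t.take (i + 1))
    rw [hb, List.take_length] at hsuf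
    have hm : p.length ≤ i + 1 := by
      have hl := hsuf.length_le
      rw [hlen] at hl
      exact hl
    refine ⟨hm, ?_⟩
    have heq := List.suffix_iff_eq_drop.mp hsuf
    rw [hlen, List.drop_take,
      show i + 1 - (i + 1 - p.length) = p.length from by omega] at heq
    have ha : (i : Int) - (p.length : Int) + 1 = ((i + 1 - p.length : Nat) : Int) := by
      omega
    have hb' : (i : Int) + 1 = ((i + 1 : Nat) : Int) := by push_cast; ring
    rw [ha, hb', PySem.List.slice_natCast,
      show i + 1 - (i + 1 - p.length) = p.length from by omega]
    exact heq.symm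

lemma B_eq (text pattern : String) :
    finite_automaton_search_alt text pattern = pvMatches pattern.toList [] text.toList := by
  rw [finite_automaton_search_alt, pvMatches]
  simp only [List.nil_append]
  rw [filter_map_eq_filterMap]
  apply List.filterMap_congr
  intro i hi
  have hi' : i < text.toList.length := List.mem_range.mp hi
  by_cases hb : pvBord pattern.toList (text.toList.take (i + 1)) = pattern.toList.length
  · rw [if_pos ((cond_iff _ _ i hi').mpr hb), if_pos hb]
    congr 1
    simp
  · rw [if_neg (fun hc => hb ((cond_iff _ _ i hi').mp hc)), if_neg hb]

-- ===== VERDICT (by name: the statement is the Claim_ definition above) =====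
theorem finite_automaton_search_spec : Claim_equal_finite_automaton_search := by
  intro text pattern _
  unfold Spec_finite_automaton_search
  rw [A_eq, B_eq]
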